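-- pv_equiv track=rewrite | github.com/gkr539/kg_gkr539_2020 | main.py | check_mapping
-- ===== SOURCE A (Python) =====
-- def check_mapping(s1,s2):
--     if len(s1) < len(s2):
--         return False
--     used = set()
--     for char in s1:
--         if char in used:
--             return False
--         used.add(char)
--     return True
-- ===== SOURCE B (Python) =====
-- def check_mapping(s1, s2):
--     if len(s1) < len(s2):
--         return False
--     t = sorted(s1)
--     return all(a != b for a, b in zip(t, t[1:]))
-- ===== Notes on version B (the rewrite author's own statement) =====
-- stated objective: alternative
-- what changed: Replaces the incremental membership-set loop with early return by sort-then-scan: sort the characters of s1 and check that no two adjacent sorted characters are equal (duplicates are adjacent after sorting).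
import Mathlib
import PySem

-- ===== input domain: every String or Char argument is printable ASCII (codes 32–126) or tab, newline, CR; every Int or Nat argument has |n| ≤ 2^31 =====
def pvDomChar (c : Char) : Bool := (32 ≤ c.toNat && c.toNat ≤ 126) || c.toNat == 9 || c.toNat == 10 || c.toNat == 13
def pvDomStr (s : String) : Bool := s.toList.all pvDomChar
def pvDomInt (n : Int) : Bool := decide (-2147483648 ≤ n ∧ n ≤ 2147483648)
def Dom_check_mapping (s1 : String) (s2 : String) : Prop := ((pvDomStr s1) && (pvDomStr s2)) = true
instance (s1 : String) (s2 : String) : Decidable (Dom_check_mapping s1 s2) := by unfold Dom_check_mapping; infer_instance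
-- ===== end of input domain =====

-- B replaces A's incremental membership-set loop by sort-then-adjacent-scan; objective: alternative.

-- ===== PORT A =====
-- the 'for char in s1' loop with the 'used' set and early 'return False'
def checkLoopA : List Char → PySem.Set Char → Bool
  | [], _ => true
  | c :: rest, used =>
      if PySem.Set.contains used c then false
      else checkLoopA rest (PySem.Set.add used c)

def check_mapping (s1 : String) (s2 : String) : Bool :=
  if PySem.Str.len s1 < PySem.Str.len s2 then false
  else checkLoopA s1.toList PySem.Set.empty

-- ===== PORT B =====
-- all(a != b for a, b in zip(t, t[1:]))
def allAdjNe (t : List Char) : Bool :=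
  (t.zip (PySem.List.slice t (some 1) none)).all (fun p => p.1 != p.2)

def check_mapping_alt (s1 : String) (s2 : String) : Bool :=
  if PySem.Str.len s1 < PySem.Str.len s2 then false
  else allAdjNe (PySem.List.sorted s1.toList (fun c => c) false)

-- ===== PRECONDITION & SPEC =====
def Spec_check_mapping (s1 : String) (s2 : String) (out : Bool) : Prop := out = check_mapping_alt s1 s2
instance (s1 : String) (s2 : String) (out : Bool) : Decidable (Spec_check_mapping s1 s2 out) := by unfold Spec_check_mapping; infer_instance

-- ===== CLAIM (what is proved, stated in full; the proofs are below) =====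
def Claim_equal_check_mapping : Prop := ∀ (s1 : String) (s2 : String), Dom_check_mapping s1 s2 → Spec_check_mapping s1 s2 (check_mapping s1 s2)

-- ===== LEMMAS AND PROOFS =====

-- A's loop decides: the remaining chars are pairwise distinct and none is already used
theorem checkLoopA_eq_decide (xs : List Char) (s : PySem.Set Char) :
    checkLoopA xs s = decide (xs.Nodup ∧ ∀ x ∈ xs, x ∉ s) := by
  induction xs generalizing s with
  | nil => simp [checkLoopA]
  | cons c rest ih =>
      simp only [checkLoopA]
      by_cases hc : PySem.Set.contains s c = true
      · have hmem : c ∈ s := by simpa [PySem.Set.contains] using hc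
        rw [if_pos hc]
        symm
        simp only [decide_eq_false_iff_not, not_and]
        intro _ h
        exact absurd hmem (h c (by simp))
      · have hmem : c ∉ s := by simpa [PySem.Set.contains] using hc
        rw [if_neg hc, ih]
        simp only [decide_eq_decide, List.nodup_cons, List.mem_cons]
        constructor
        · rintro ⟨hnd, hall⟩
          have hcr : c ∉ rest := by
            intro hcr
            exact (hall c hcr) (by simp [PySem.Set.mem_add])
          refine ⟨⟨hcr, hnd⟩, ?_⟩
          rintro x (rfl | hx)
          · exact hmem
          · intro hxs
            exact (hall x hx) (by simp [PySem.Set.mem_add, hxs])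
        · rintro ⟨⟨hcr, hnd⟩, hall⟩
          refine ⟨hnd, ?_⟩
          intro x hx hxadd
          rcases (PySem.Set.mem_add s c x).mp hxadd with hxs | rfl
          · exact (hall x (Or.inr hx)) hxs
          · exact hcr hx

-- zip-with-tail all-≠ decides Chain' (· ≠ ·)
theorem allAdjNe_eq_decide (t : List Char) :
    allAdjNe t = decide (List.IsChain (· ≠ ·) t) := by
  unfold allAdjNe
  rw [PySem.List.slice_from_one]
  induction t with
  | nil => simp
  | cons a r ih =>
      cases r with
      | nil => simp
      | cons b r' =>
          simp only [List.tail_cons, List.zip_cons_cons, List.all_cons, List.isChain_cons_cons] at *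
          rw [ih]
          by_cases hab : a = b <;> simp [hab]

-- combining two chains
theorem chain'_and {α : Type} (R S : α → α → Prop) (t : List α)
    (hR : List.IsChain R t) (hS : List.IsChain S t) :
    List.IsChain (fun a b => R a b ∧ S a b) t := by
  induction t with
  | nil => simp
  | cons a r ih =>
      cases r with
      | nil => simp
      | cons b r' =>
          rw [List.isChain_cons_cons] at *
          exact ⟨⟨hR.1, hS.1⟩, ih hR.2 hS.2⟩

-- on a ≤-sorted list, adjacent distinctness is exactly Nodup
theorem chain'_ne_iff_nodup (t : List Char) (hs : t.Pairwise (· ≤ ·)) :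
    List.IsChain (· ≠ ·) t ↔ t.Nodup := by
  constructor
  · intro hne
    have hle : List.IsChain (· ≤ ·) t := hs.isChain
    have hlt : List.IsChain (· < ·) t := by
      have := chain'_and (· ≤ ·) (· ≠ ·) t hle hne
      exact this.imp (by intro a b h; exact lt_of_le_of_ne h.1 h.2)
    have hpw : t.Pairwise (· < ·) := List.isChain_iff_pairwise.mp hlt
    exact hpw.imp ne_of_lt
  · intro hnd
    exact hnd.isChain

-- ===== VERDICT (by name: the statement is the Claim_ definition above) =====
theorem check_mapping_spec : Claim_equal_check_mapping := by
  intro s1 s2 _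
  unfold Spec_check_mapping check_mapping check_mapping_alt
  by_cases h : PySem.Str.len s1 < PySem.Str.len s2
  · rw [if_pos h, if_pos h]
  · rw [if_neg h, if_neg h]
    rw [checkLoopA_eq_decide, allAdjNe_eq_decide]
    have hperm := PySem.List.sorted_perm s1.toList (fun c => c) false
    have hpw := PySem.List.sorted_pairwise s1.toList (fun c => c)
    rw [decide_eq_decide, chain'_ne_iff_nodup _ hpw, hperm.nodup_iff]
    simp [PySem.Set.empty]
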